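-- pv_equiv track=rewrite | github.com/AntonioEscobar01/IIC2233-2023-1-Resuelto | Tareas/T0/functions.py | verificar_tortugas
-- ===== SOURCE A (Python) =====
-- def verificar_tortugas(tablero: list) -> int:
--     cantidad_tortugas_invalidas = 0
--     for numero_fila, fila_elemento in enumerate(tablero):
--         for numero_columna, elemento in enumerate(fila_elemento):
--             if elemento == 'T':
--                 columna_elemento = [fila[numero_columna] for fila in tablero]
--                 contiguas_horizontales = revisar_celdas_vecinas(
--                     fila_elemento, numero_columna)
--                 contiguas_verticales = revisar_celdas_vecinas(
--                     columna_elemento, numero_fila)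
--                 if contiguas_horizontales is True or contiguas_verticales is True:
--                     cantidad_tortugas_invalidas += 1
--     return cantidad_tortugas_invalidas
--
-- def revisar_celdas_vecinas(lista_revisar: list, posicion: int) -> bool:
--     tortugas_contiguas = False
--     if (posicion + 1) < len(lista_revisar):
--         if lista_revisar[posicion + 1] == 'T':
--             tortugas_contiguas = True
--     if (posicion - 1) >= 0:
--         if lista_revisar[posicion - 1] == 'T':
--             tortugas_contiguas = True
--     return tortugas_contiguas
-- ===== SOURCE B (Python) =====
-- def verificar_tortugas(tablero: list) -> int:
--     invalidas = set()
--     for i, fila in enumerate(tablero):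
--         for j in range(len(fila) - 1):
--             if fila[j] == 'T' and fila[j + 1] == 'T':
--                 invalidas.add((i, j))
--                 invalidas.add((i, j + 1))
--     for i in range(len(tablero) - 1):
--         fila = tablero[i]
--         abajo = tablero[i + 1]
--         for j in range(min(len(fila), len(abajo))):
--             if fila[j] == 'T' and abajo[j] == 'T':
--                 invalidas.add((i, j))
--                 invalidas.add((i + 1, j))
--     return len(invalidas)
-- ===== Notes on version B (the rewrite author's own statement) =====
-- stated objective: alternative
-- what changed: Instead of scanning, for every 'T' cell, its row and a freshly built column list with a neighbor helper, B makes one pass over consecutive horizontal and vertical pairs and collects the coordinates of adjacent-T cells in a set, returning its size.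
-- crash fix: On ragged boards that contain a 'T' in a column longer than some other row, A raises IndexError while building the column slice; B returns the adjacency count computed from the pairs that exist. — e.g. on verificar_tortugas([["T", "T"], ["T"]]): A raises IndexError, B returns 3
import Mathlib
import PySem

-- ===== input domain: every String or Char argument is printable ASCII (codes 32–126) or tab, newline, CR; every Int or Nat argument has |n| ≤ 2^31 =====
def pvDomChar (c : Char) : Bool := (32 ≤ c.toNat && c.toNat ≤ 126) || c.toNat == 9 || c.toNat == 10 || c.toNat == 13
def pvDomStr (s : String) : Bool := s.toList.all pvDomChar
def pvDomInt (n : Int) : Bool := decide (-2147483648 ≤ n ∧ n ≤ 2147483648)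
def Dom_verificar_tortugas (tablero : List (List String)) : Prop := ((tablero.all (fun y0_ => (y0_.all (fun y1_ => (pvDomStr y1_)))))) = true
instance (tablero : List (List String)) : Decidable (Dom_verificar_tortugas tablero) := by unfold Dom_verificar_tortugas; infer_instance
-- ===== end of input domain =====

-- B replaces A's per-'T'-cell neighbour scan (which rebuilds a whole column list for every turtle)
-- by a single pass over consecutive horizontal and vertical pairs collecting the invalid coordinates in a set.

-- ===== PORT A =====
def revisar_celdas_vecinas (lista_revisar : List String) (posicion : Int) : Bool :=
  let tortugas_contiguas := false
  let tortugas_contiguas :=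
    if posicion + 1 < (lista_revisar.length : Int) then
      if PySem.List.pyGet? lista_revisar (posicion + 1) == some "T" then true else tortugas_contiguas
    else tortugas_contiguas
  let tortugas_contiguas :=
    if posicion - 1 ≥ 0 then
      if PySem.List.pyGet? lista_revisar (posicion - 1) == some "T" then true else tortugas_contiguas
    else tortugas_contiguas
  tortugas_contiguas

-- the column comprehension '[fila[numero_columna] for fila in tablero]' is ported with pyGetD;
-- it is exact under Pre_ (Python raises IndexError there on the excluded ragged boards).
def verificar_tortugas (tablero : List (List String)) : Int :=
  (PySem.List.enumerate tablero 0).foldl (fun cantidad p =>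
    (PySem.List.enumerate p.2 0).foldl (fun cantidad2 q =>
      if q.2 == "T" then
        let columna_elemento := tablero.map (fun fila => PySem.List.pyGetD fila q.1 "")
        let contiguas_horizontales := revisar_celdas_vecinas p.2 q.1
        let contiguas_verticales := revisar_celdas_vecinas columna_elemento p.1
        if contiguas_horizontales == true || contiguas_verticales == true then cantidad2 + 1
        else cantidad2
      else cantidad2) cantidad) 0

-- ===== PORT B =====
-- every pyGetD index below is produced by a range that keeps it in bounds, so pyGetD is exact.
def verificar_tortugas_alt (tablero : List (List String)) : Int :=
  let invalidas : PySem.Set (Int × Int) := PySem.Set.empty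
  let invalidas := (PySem.List.enumerate tablero 0).foldl (fun s p =>
    (PySem.List.pyRange 0 ((p.2.length : Int) - 1) 1).foldl (fun s j =>
      if (PySem.List.pyGetD p.2 j "" == "T") && (PySem.List.pyGetD p.2 (j + 1) "" == "T") then
        PySem.Set.add (PySem.Set.add s (p.1, j)) (p.1, j + 1)
      else s) s) invalidas
  let invalidas := (PySem.List.pyRange 0 ((tablero.length : Int) - 1) 1).foldl (fun s i =>
    let fila := PySem.List.pyGetD tablero i []
    let abajo := PySem.List.pyGetD tablero (i + 1) []
    (PySem.List.pyRange 0 (min ((fila.length : Int)) ((abajo.length : Int))) 1).foldl (fun s j =>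
      if (PySem.List.pyGetD fila j "" == "T") && (PySem.List.pyGetD abajo j "" == "T") then
        PySem.Set.add (PySem.Set.add s (i, j)) (i + 1, j)
      else s) s) invalidas
  PySem.Set.len invalidas

-- ===== PRECONDITION & SPEC =====
-- Pre_ excludes exactly the ragged boards on which A raises IndexError: boards with a 'T' in a
-- column index that some (shorter) row does not have.
def Pre_verificar_tortugas (tablero : List (List String)) : Prop :=
  ∀ fila ∈ tablero, ∀ j : Fin fila.length, fila[j] = "T" → ∀ row ∈ tablero, (j : Nat) < row.length
instance (tablero : List (List String)) : Decidable (Pre_verificar_tortugas tablero) := by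
  unfold Pre_verificar_tortugas; infer_instance
def pvWitness_verificar_tortugas : List (List String) := [["T", "T", "."], [".", "T", "X"]]

-- On ragged boards containing a 'T' in a column longer than some other row, A raises IndexError
-- while building the column list; B returns the adjacency count computed from the pairs that exist.
def Raises_verificar_tortugas (tablero : List (List String)) : Prop :=
  ∃ fila ∈ tablero, ∃ j : Fin fila.length, fila[j] = "T" ∧ ∃ row ∈ tablero, row.length ≤ (j : Nat)
instance (tablero : List (List String)) : Decidable (Raises_verificar_tortugas tablero) := by
  unfold Raises_verificar_tortugas; infer_instance
def pvRaiseWitness_verificar_tortugas : List (List String) := [["T", "T"], ["T"]]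
def pvRaiseWitnessOut_verificar_tortugas : Int := 3

def Spec_verificar_tortugas (tablero : List (List String)) (out : Int) : Prop := out = verificar_tortugas_alt tablero
instance (tablero : List (List String)) (out : Int) : Decidable (Spec_verificar_tortugas tablero out) := by unfold Spec_verificar_tortugas; infer_instance

-- ===== CLAIM (what is proved, stated in full; the proofs are below) =====
def Claim_equal_verificar_tortugas : Prop := ∀ (tablero : List (List String)), Dom_verificar_tortugas tablero → Pre_verificar_tortugas tablero → Spec_verificar_tortugas tablero (verificar_tortugas tablero)
def Claim_raises_verificar_tortugas : Prop := (∀ (tablero : List (List String)), Dom_verificar_tortugas tablero → Raises_verificar_tortugas tablero → ¬ Pre_verificar_tortugas tablero) ∧ (Dom_verificar_tortugas (pvRaiseWitness_verificar_tortugas) ∧ Raises_verificar_tortugas (pvRaiseWitness_verificar_tortugas) ∧ verificar_tortugas_alt (pvRaiseWitness_verificar_tortugas) = pvRaiseWitnessOut_verificar_tortugas)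

-- ===== LEMMAS AND PROOFS =====

def tcell (t : List (List String)) (i j : Int) : Bool :=
  decide (0 ≤ i) && decide (0 ≤ j) && ((t[i.toNat]?.bind (fun r => r[j.toNat]?)) == some "T")

def tbad (t : List (List String)) (i j : Int) : Bool :=
  tcell t i j && ((tcell t i (j - 1) || tcell t i (j + 1)) || (tcell t (i - 1) j || tcell t (i + 1) j))

lemma pyGetD_T (r : List String) (j : Int) (h : 0 ≤ j) :
    (PySem.List.pyGetD r j "" == "T") = (r[j.toNat]? == some "T") := by
  obtain ⟨n, rfl⟩ := Int.eq_ofNat_of_zero_le h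
  rw [Int.toNat_natCast, PySem.List.pyGetD_natCast, List.getD_eq_getElem?_getD]
  cases r[n]? <;> simp

lemma tcell_row (t : List (List String)) (k : Nat) (r : List String) (hk : t[k]? = some r) (j : Int) :
    tcell t (k : Int) j = (decide (0 ≤ j) && (r[j.toNat]? == some "T")) := by
  simp [tcell, hk]

lemma tcell_out (t : List (List String)) (k : Nat) (hk : t.length ≤ k) (j : Int) :
    tcell t (k : Int) j = false := by
  simp [tcell, List.getElem?_eq_none hk]

lemma tcell_negi (t : List (List String)) (i j : Int) (h : i < 0) : tcell t i j = false := by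
  simp [tcell]; omega

lemma tcell_negj (t : List (List String)) (i j : Int) (h : j < 0) : tcell t i j = false := by
  simp [tcell]; intro; omega

lemma revisar_eq (l : List String) (p : Int) :
    revisar_celdas_vecinas l p =
      ((decide (0 ≤ p - 1) && (PySem.List.pyGet? l (p - 1) == some "T")) ||
       (decide (p + 1 < (l.length : Int)) && (PySem.List.pyGet? l (p + 1) == some "T"))) := by
  unfold revisar_celdas_vecinas
  split_ifs with h1 h2 h3 h4 <;> simp_all

lemma getD_T (o : Option String) : (o.getD "" = "T") ↔ (o = some "T") := by
  cases o <;> simp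

lemma horiz (t : List (List String)) (k : Nat) (hk : k < t.length) (m : Nat) :
    revisar_celdas_vecinas t[k] (m : Int) = (tcell t (k : Int) ((m : Int) - 1) || tcell t (k : Int) ((m : Int) + 1)) := by
  have hrow : t[k]? = some t[k] := List.getElem?_eq_getElem hk
  rw [revisar_eq]
  congr 1
  · -- left neighbour
    cases m with
    | zero =>
      rw [tcell_negj t _ _ (by norm_num)]
      simp
    | succ m' =>
      rw [tcell_row t k t[k] hrow]
      have e : ((m' + 1 : Nat) : Int) - 1 = (m' : Int) := by push_cast; ring
      rw [e, PySem.List.pyGet?_natCast, Int.toNat_natCast]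
  · -- right neighbour
    rw [tcell_row t k t[k] hrow]
    have e : ((m : Nat) : Int) + 1 = ((m + 1 : Nat) : Int) := by push_cast; ring
    rw [e, PySem.List.pyGet?_natCast, Int.toNat_natCast]
    by_cases h : m + 1 < t[k].length
    · have d1 : ((m + 1 : Nat) : Int) < (t[k].length : Int) := by exact_mod_cast h
      have d2 : (0 : Int) ≤ ((m + 1 : Nat) : Int) := by positivity
      simp only [List.getElem?_eq_getElem h, d1, d2, decide_true]
    · have d1 : ¬ ((m + 1 : Nat) : Int) < (t[k].length : Int) := by
        push_cast; omega
      rw [List.getElem?_eq_none (by omega), decide_eq_false d1]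
      simp

lemma vert (t : List (List String)) (k : Nat) (hk : k < t.length) (m : Nat) :
    revisar_celdas_vecinas (t.map (fun r => PySem.List.pyGetD r (m : Int) "")) (k : Int) =
      (tcell t ((k : Int) - 1) (m : Int) || tcell t ((k : Int) + 1) (m : Int)) := by
  rw [revisar_eq]
  congr 1
  · cases k with
    | zero =>
      rw [tcell_negi t _ _ (by norm_num)]
      simp
    | succ k' =>
      have e : ((k' + 1 : Nat) : Int) - 1 = (k' : Int) := by push_cast; ring
      have hk' : k' < t.length := by omega
      rw [e, PySem.List.pyGet?_natCast, List.getElem?_map, List.getElem?_eq_getElem hk',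
        tcell_row t k' t[k'] (List.getElem?_eq_getElem hk')]
      simp [getD_T]
  · have e : ((k : Nat) : Int) + 1 = ((k + 1 : Nat) : Int) := by push_cast; ring
    rw [e, PySem.List.pyGet?_natCast]
    by_cases h : k + 1 < t.length
    · have d1 : ((k + 1 : Nat) : Int) < ((t.map (fun r => PySem.List.pyGetD r (m : Int) "")).length : Int) := by
        simp; exact_mod_cast h
      rw [List.getElem?_map, List.getElem?_eq_getElem h,
        tcell_row t (k+1) t[k+1] (List.getElem?_eq_getElem h)]
      simp only [d1, decide_true, Bool.true_and, Int.toNat_natCast, Option.map_some]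
      simp [getD_T]
    · have d1 : ¬ ((k + 1 : Nat) : Int) < ((t.map (fun r => PySem.List.pyGetD r (m : Int) "")).length : Int) := by
        simp; omega
      rw [tcell_out t (k+1) (by omega), decide_eq_false d1]
      simp

lemma condA_eq_tbad (t : List (List String)) (k m : Nat) (hk : k < t.length) (hm : m < t[k].length) :
    ((t[k][m] == "T") &&
      (revisar_celdas_vecinas t[k] (m : Int) ||
       revisar_celdas_vecinas (t.map (fun r => PySem.List.pyGetD r (m : Int) "")) (k : Int)))
      = tbad t (k : Int) (m : Int) := by
  rw [horiz t k hk m, vert t k hk m, tbad]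
  congr 1
  rw [tcell_row t k t[k] (List.getElem?_eq_getElem hk), Int.toNat_natCast,
    List.getElem?_eq_getElem hm]
  simp

lemma foldl_count_general {β : Type} (l : List β) (p : β → Bool) (f : Int → β → Int)
    (h : ∀ c x, x ∈ l → f c x = if p x then c + 1 else c) :
    ∀ c, l.foldl f c = c + ((l.countP p : Nat) : Int) := by
  induction l with
  | nil => simp
  | cons a l ih =>
    intro c
    rw [List.foldl_cons, ih (fun c x hx => h c x (List.mem_cons_of_mem a hx)),
      h c a List.mem_cons_self, List.countP_cons]
    split_ifs with hp <;> simp [hp] <;> push_cast <;> ring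

lemma foldl_sum_general {β : Type} (l : List β) (g : β → Int) (f : Int → β → Int)
    (h : ∀ c x, x ∈ l → f c x = c + g x) :
    ∀ c, l.foldl f c = c + (l.map g).sum := by
  induction l with
  | nil => simp
  | cons a l ih =>
    intro c
    rw [List.foldl_cons, ih (fun c x hx => h c x (List.mem_cons_of_mem a hx)),
      h c a List.mem_cons_self, List.map_cons, List.sum_cons]
    ring

lemma A_eq_sum (t : List (List String)) :
    verificar_tortugas t =
      ((PySem.List.enumerate t 0).map
        (fun p => ((List.countP (fun q => tbad t p.1 q.1) (PySem.List.enumerate p.2 0) : Nat) : Int))).sum := by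
  unfold verificar_tortugas
  rw [foldl_sum_general _ _ _ ?_ 0, zero_add]
  intro c p hp
  obtain ⟨k, hk, rfl⟩ := (PySem.List.mem_enumerate_iff t 0 p).mp hp
  rw [foldl_count_general _ _ _ ?_ c]
  intro c2 q hq
  obtain ⟨m, hm, rfl⟩ := (PySem.List.mem_enumerate_iff _ 0 q).mp hq
  show (if t[k][m] == "T" then
          if revisar_celdas_vecinas t[k] (0 + (m : Int)) == true ||
             revisar_celdas_vecinas (t.map (fun fila => PySem.List.pyGetD fila (0 + (m : Int)) "")) (0 + (k : Int)) == true
          then c2 + 1 else c2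
        else c2) = _
  rw [zero_add, zero_add, ← condA_eq_tbad t k m hk hm]
  cases h1 : (t[k][m] == "T") <;>
    cases h2 : (revisar_celdas_vecinas t[k] (m : Int) ||
      revisar_celdas_vecinas (t.map (fun r => PySem.List.pyGetD r (m : Int) "")) (k : Int)) <;>
    simp_all

def allCoords (t : List (List String)) : List (Int × Int) :=
  (PySem.List.enumerate t 0).flatMap (fun p => (PySem.List.enumerate p.2 0).map (fun q => (p.1, q.1)))

def badCoords (t : List (List String)) : List (Int × Int) :=
  (allCoords t).filter (fun p => tbad t p.1 p.2)

lemma A_eq_card (t : List (List String)) :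
    verificar_tortugas t = ((badCoords t).length : Int) := by
  rw [A_eq_sum, badCoords, allCoords, List.filter_flatMap, List.length_flatMap,
    Nat.cast_list_sum, List.map_map]
  congr 1
  apply List.map_congr_left
  intro p hp
  simp only [Function.comp_apply, List.filter_map, List.length_map]
  rw [← List.countP_eq_length_filter]
  rfl

lemma mem_allCoords (t : List (List String)) (y : Int × Int) :
    y ∈ allCoords t ↔ ∃ (k m : Nat) (hk : k < t.length), m < (t[k]'hk).length ∧ y = ((k : Int), (m : Int)) := by
  simp only [allCoords, List.mem_flatMap, PySem.List.mem_enumerate_iff, List.mem_map]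
  constructor
  · rintro ⟨p, ⟨k, hk, rfl⟩, q, ⟨m, hm, rfl⟩, rfl⟩
    exact ⟨k, m, hk, hm, by simp⟩
  · rintro ⟨k, m, hk, hm, rfl⟩
    exact ⟨(k, t[k]), ⟨k, hk, by simp⟩, ((m : Int), t[k][m]), ⟨m, hm, by simp⟩, by simp⟩

lemma nodup_allCoords (t : List (List String)) : (allCoords t).Nodup := by
  rw [allCoords, List.nodup_flatMap]
  constructor
  · intro p _
    apply List.Pairwise.map
    · intro a b (h : a.1 < b.1)
      intro (he : (p.1, a.1) = (p.1, b.1))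
      rw [Prod.mk.injEq] at he
      omega
    · exact PySem.List.pairwise_lt_enumerate p.2 0
  · apply List.Pairwise.imp ?_ (PySem.List.pairwise_lt_enumerate t 0)
    intro a b (h : a.1 < b.1)
    intro z hza hzb
    simp only [List.mem_map] at hza hzb
    obtain ⟨q1, _, rfl⟩ := hza
    obtain ⟨q2, _, he⟩ := hzb
    rw [Prod.mk.injEq] at he
    omega

lemma tcell_bounds (t : List (List String)) (i j : Int) (h : tcell t i j = true) :
    0 ≤ i ∧ 0 ≤ j ∧ ∃ hk : i.toNat < t.length, j.toNat < (t[i.toNat]'hk).length := by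
  simp only [tcell, Bool.and_eq_true, decide_eq_true_eq, beq_iff_eq] at h
  obtain ⟨⟨hi, hj⟩, hb⟩ := h
  cases hrow : t[i.toNat]? with
  | none => rw [hrow] at hb; simp at hb
  | some r =>
    rw [hrow] at hb
    simp only [Option.bind_some] at hb
    have hk : i.toNat < t.length := List.getElem?_eq_some_iff.mp hrow |>.1
    refine ⟨hi, hj, hk, ?_⟩
    have : t[i.toNat] = r := by
      have := List.getElem?_eq_getElem hk
      rw [hrow] at this; exact (Option.some_inj.mp this).symm
    rw [this]
    exact (List.getElem?_eq_some_iff.mp hb).1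

lemma mem_badCoords (t : List (List String)) (y : Int × Int) :
    y ∈ badCoords t ↔ tbad t y.1 y.2 = true := by
  rw [badCoords, List.mem_filter]
  constructor
  · exact fun h => h.2
  · intro h
    refine ⟨?_, h⟩
    have hcell : tcell t y.1 y.2 = true := by
      simp only [tbad, Bool.and_eq_true] at h; exact h.1
    obtain ⟨hi, hj, hk, hm⟩ := tcell_bounds t y.1 y.2 hcell
    rw [mem_allCoords]
    exact ⟨y.1.toNat, y.2.toNat, hk, hm, by
      rw [Int.toNat_of_nonneg hi, Int.toNat_of_nonneg hj]⟩

lemma set_len_eq {α : Type} (s : PySem.Set α) : PySem.Set.len s = (s.length : Int) := by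
  simp [PySem.Set.len]

lemma mem_add2_if {α : Type} [BEq α] [LawfulBEq α] (s : PySem.Set α) (c : Bool) (a b y : α) :
    (y ∈ (if c then PySem.Set.add (PySem.Set.add s a) b else s)) ↔ y ∈ s ∨ (c = true ∧ (y = a ∨ y = b)) := by
  cases c <;> simp [PySem.Set.mem_add] <;> tauto

lemma nodup_add2_if {α : Type} [BEq α] [LawfulBEq α] (s : PySem.Set α) (c : Bool) (a b : α)
    (h : List.Nodup s) : List.Nodup (if c then PySem.Set.add (PySem.Set.add s a) b else s) := by
  cases c
  · exact h
  · exact PySem.Set.nodup_add _ _ (PySem.Set.nodup_add _ _ h)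

lemma tcell_iff (t : List (List String)) (i j : Int) :
    tcell t i j = true ↔ 0 ≤ i ∧ 0 ≤ j ∧ ∃ r, t[i.toNat]? = some r ∧ r[j.toNat]? = some "T" := by
  simp only [tcell, Bool.and_eq_true, decide_eq_true_eq, beq_iff_eq, and_assoc]
  cases h : t[i.toNat]? <;> simp [h]

lemma pyGetD_row (t : List (List String)) (i : Int) (h0 : 0 ≤ i) (h : i.toNat < t.length) :
    PySem.List.pyGetD t i [] = t[i.toNat] := by
  obtain ⟨n, rfl⟩ := Int.eq_ofNat_of_zero_le h0
  rw [PySem.List.pyGetD_natCast]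
  simp only [Int.toNat_natCast] at h ⊢
  exact List.getD_eq_getElem t [] h

lemma mem_foldl_set {α β : Type} [BEq α] [LawfulBEq α] (l : List β)
    (F : PySem.Set α → β → PySem.Set α) (P : β → α → Prop)
    (h : ∀ s x y, y ∈ F s x ↔ y ∈ s ∨ P x y) (s : PySem.Set α) (y : α) :
    y ∈ l.foldl F s ↔ y ∈ s ∨ ∃ x ∈ l, P x y := by
  induction l generalizing s with
  | nil => simp
  | cons a l ih => rw [List.foldl_cons, ih, h]; simp; tauto

lemma nodup_foldl_set {α β : Type} (l : List β) (F : PySem.Set α → β → PySem.Set α)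
    (h : ∀ s x, List.Nodup s → List.Nodup (F s x)) (s : PySem.Set α) (hs : List.Nodup s) :
    List.Nodup (l.foldl F s) := by
  induction l generalizing s with
  | nil => exact hs
  | cons a l ih => exact ih _ (h _ _ hs)

def Hprop (t : List (List String)) (y : Int × Int) : Prop :=
  ∃ p ∈ PySem.List.enumerate t 0, ∃ j ∈ PySem.List.pyRange 0 ((p.2.length : Int) - 1) 1,
    ((PySem.List.pyGetD p.2 j "" == "T") && (PySem.List.pyGetD p.2 (j + 1) "" == "T")) = true ∧
    (y = (p.1, j) ∨ y = (p.1, j + 1))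

def Vprop (t : List (List String)) (y : Int × Int) : Prop :=
  ∃ i ∈ PySem.List.pyRange 0 ((t.length : Int) - 1) 1,
    ∃ j ∈ PySem.List.pyRange 0
      (min ((PySem.List.pyGetD t i []).length : Int) ((PySem.List.pyGetD t (i + 1) []).length : Int)) 1,
    ((PySem.List.pyGetD (PySem.List.pyGetD t i []) j "" == "T") &&
     (PySem.List.pyGetD (PySem.List.pyGetD t (i + 1) []) j "" == "T")) = true ∧
    (y = (i, j) ∨ y = (i + 1, j))

lemma pv_getElem_eq_of_some {α : Type} (t : List α) (k : Nat) (r : α)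
    (h : t[k]? = some r) (hk : k < t.length) : t[k] = r := by
  have h2 := List.getElem?_eq_getElem hk
  rw [h] at h2
  exact (Option.some_inj.mp h2).symm

lemma HV_iff (t : List (List String)) (y : Int × Int) :
    (Hprop t y ∨ Vprop t y) ↔ tbad t y.1 y.2 = true := by
  constructor
  · rintro (⟨p, hp, j, hjr, hcond, hy⟩ | ⟨i, hir, j, hjr, hcond, hy⟩)
    · -- horizontal pair
      obtain ⟨k, hk, rfl⟩ := (PySem.List.mem_enumerate_iff t 0 p).mp hp
      simp only [zero_add] at *
      obtain ⟨hj0, hjlt⟩ := PySem.List.mem_pyRange_one.mp hjr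
      rw [Bool.and_eq_true, pyGetD_T _ j hj0, pyGetD_T _ (j + 1) (by omega)] at hcond
      obtain ⟨hL, hR⟩ := hcond
      simp only [beq_iff_eq] at hL hR
      have hrow : t[k]? = some t[k] := List.getElem?_eq_getElem hk
      have c1 : tcell t (k : Int) j = true := by
        rw [tcell_iff]
        exact ⟨by positivity, hj0, t[k], by simpa using hrow, hL⟩
      have c2 : tcell t (k : Int) (j + 1) = true := by
        rw [tcell_iff]
        exact ⟨by positivity, by omega, t[k], by simpa using hrow, hR⟩
      rcases hy with rfl | rfl <;> simp only [tbad]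
      · simp [c1, c2]
      · have e : j + 1 - 1 = j := by ring
        simp [e, c1, c2]
    · -- vertical pair
      obtain ⟨hi0, hilt⟩ := PySem.List.mem_pyRange_one.mp hir
      obtain ⟨hj0, hjlt⟩ := PySem.List.mem_pyRange_one.mp hjr
      have hkn : i.toNat < t.length := by omega
      have hkn1 : (i + 1).toNat < t.length := by omega
      have e1 : PySem.List.pyGetD t i [] = t[i.toNat] := pyGetD_row t i hi0 hkn
      have e2 : PySem.List.pyGetD t (i + 1) [] = t[(i + 1).toNat] := pyGetD_row t (i + 1) (by omega) hkn1
      rw [e1, e2, lt_min_iff] at hjlt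
      rw [Bool.and_eq_true, e1, e2, pyGetD_T _ j hj0, pyGetD_T _ j hj0] at hcond
      obtain ⟨hL, hR⟩ := hcond
      simp only [beq_iff_eq] at hL hR
      have c1 : tcell t i j = true := by
        rw [tcell_iff]
        exact ⟨hi0, hj0, t[i.toNat], List.getElem?_eq_getElem hkn, hL⟩
      have c2 : tcell t (i + 1) j = true := by
        rw [tcell_iff]
        exact ⟨by omega, hj0, t[(i + 1).toNat], List.getElem?_eq_getElem hkn1, hR⟩
      rcases hy with rfl | rfl <;> simp only [tbad]
      · simp [c1, c2]
      · have e : i + 1 - 1 = i := by ring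
        simp [e, c1, c2]
  · intro h
    simp only [tbad, Bool.and_eq_true, Bool.or_eq_true] at h
    obtain ⟨hc, hnb⟩ := h
    obtain ⟨hi0, hj0, r, hri, hrj⟩ := (tcell_iff t y.1 y.2).mp hc
    have hkn : y.1.toNat < t.length := (List.getElem?_eq_some_iff.mp hri).1
    have hreq : t[y.1.toNat] = r := pv_getElem_eq_of_some t y.1.toNat r hri hkn
    have hmn : y.2.toNat < r.length := (List.getElem?_eq_some_iff.mp hrj).1
    have hpmem : ((y.1.toNat : Int), t[y.1.toNat]) ∈ PySem.List.enumerate t 0 :=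
      (PySem.List.mem_enumerate_iff t 0 _).mpr ⟨y.1.toNat, hkn, by simp⟩
    have hy1 : ((y.1.toNat : Int)) = y.1 := Int.toNat_of_nonneg hi0
    rcases hnb with (hn | hn) | (hn | hn)
    · -- left neighbour: horizontal pair (j-1, j)
      obtain ⟨_, hj10, r', hri', hrj'⟩ := (tcell_iff t y.1 (y.2 - 1)).mp hn
      rw [hri] at hri'
      obtain rfl : r = r' := Option.some_inj.mp hri'
      left
      refine ⟨_, hpmem, y.2 - 1, ?_, ?_, Or.inr ?_⟩
      · rw [PySem.List.mem_pyRange_one]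
        refine ⟨by omega, ?_⟩
        simp only [hreq]; omega
      · simp only [hreq]
        rw [Bool.and_eq_true, pyGetD_T _ _ hj10, pyGetD_T _ _ (by omega : (0:Int) ≤ y.2 - 1 + 1)]
        have e : y.2 - 1 + 1 = y.2 := by ring
        rw [e]
        exact ⟨by simp only [beq_iff_eq]; exact hrj', by simp only [beq_iff_eq]; exact hrj⟩
      · rw [Prod.ext_iff]
        exact ⟨by omega, by omega⟩
    · -- right neighbour: horizontal pair (j, j+1)
      obtain ⟨_, _, r', hri', hrj'⟩ := (tcell_iff t y.1 (y.2 + 1)).mp hn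
      rw [hri] at hri'
      obtain rfl : r = r' := Option.some_inj.mp hri'
      have hmn' : (y.2 + 1).toNat < r.length := (List.getElem?_eq_some_iff.mp hrj').1
      left
      refine ⟨_, hpmem, y.2, ?_, ?_, Or.inl ?_⟩
      · rw [PySem.List.mem_pyRange_one]
        refine ⟨hj0, ?_⟩
        simp only [hreq]; omega
      · simp only [hreq]
        rw [Bool.and_eq_true, pyGetD_T _ _ hj0, pyGetD_T _ _ (by omega : (0:Int) ≤ y.2 + 1)]
        exact ⟨by simp only [beq_iff_eq]; exact hrj, by simp only [beq_iff_eq]; exact hrj'⟩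
      · rw [Prod.ext_iff]
        exact ⟨by omega, by omega⟩
    · -- upper neighbour: vertical pair (i-1, i)
      obtain ⟨hi10, _, r', hri', hrj'⟩ := (tcell_iff t (y.1 - 1) y.2).mp hn
      have hkn' : (y.1 - 1).toNat < t.length := (List.getElem?_eq_some_iff.mp hri').1
      have hreq' : t[(y.1 - 1).toNat] = r' := pv_getElem_eq_of_some t (y.1 - 1).toNat r' hri' hkn'
      have hmn' : y.2.toNat < r'.length := (List.getElem?_eq_some_iff.mp hrj').1
      have e : y.1 - 1 + 1 = y.1 := by ring
      right
      refine ⟨y.1 - 1, ?_, y.2, ?_, ?_, Or.inr ?_⟩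
      · rw [PySem.List.mem_pyRange_one]; omega
      · rw [PySem.List.mem_pyRange_one, lt_min_iff,
          pyGetD_row t (y.1 - 1) hi10 hkn', e, pyGetD_row t y.1 hi0 hkn, hreq', hreq]
        refine ⟨hj0, by omega, by omega⟩
      · rw [Bool.and_eq_true, pyGetD_row t (y.1 - 1) hi10 hkn', e, pyGetD_row t y.1 hi0 hkn,
          hreq', hreq, pyGetD_T _ _ hj0, pyGetD_T _ _ hj0]
        exact ⟨by simp only [beq_iff_eq]; exact hrj', by simp only [beq_iff_eq]; exact hrj⟩
      · rw [Prod.ext_iff]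
        exact ⟨by omega, by omega⟩
    · -- lower neighbour: vertical pair (i, i+1)
      obtain ⟨_, _, r', hri', hrj'⟩ := (tcell_iff t (y.1 + 1) y.2).mp hn
      have hkn' : (y.1 + 1).toNat < t.length := (List.getElem?_eq_some_iff.mp hri').1
      have hreq' : t[(y.1 + 1).toNat] = r' := pv_getElem_eq_of_some t (y.1 + 1).toNat r' hri' hkn'
      have hmn' : y.2.toNat < r'.length := (List.getElem?_eq_some_iff.mp hrj').1
      right
      refine ⟨y.1, ?_, y.2, ?_, ?_, Or.inl ?_⟩
      · rw [PySem.List.mem_pyRange_one]; omega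
      · rw [PySem.List.mem_pyRange_one, lt_min_iff,
          pyGetD_row t y.1 hi0 hkn, pyGetD_row t (y.1 + 1) (by omega) hkn', hreq', hreq]
        refine ⟨hj0, by omega, by omega⟩
      · rw [Bool.and_eq_true, pyGetD_row t y.1 hi0 hkn, pyGetD_row t (y.1 + 1) (by omega) hkn',
          hreq', hreq, pyGetD_T _ _ hj0, pyGetD_T _ _ hj0]
        exact ⟨by simp only [beq_iff_eq]; exact hrj, by simp only [beq_iff_eq]; exact hrj'⟩
      · rw [Prod.ext_iff]
        exact ⟨by omega, by omega⟩

def hFold (t : List (List String)) : PySem.Set (Int × Int) :=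
  (PySem.List.enumerate t 0).foldl (fun s p =>
    (PySem.List.pyRange 0 ((p.2.length : Int) - 1) 1).foldl (fun s j =>
      if (PySem.List.pyGetD p.2 j "" == "T") && (PySem.List.pyGetD p.2 (j + 1) "" == "T") then
        PySem.Set.add (PySem.Set.add s (p.1, j)) (p.1, j + 1)
      else s) s) PySem.Set.empty

def Sterm (t : List (List String)) : PySem.Set (Int × Int) :=
  (PySem.List.pyRange 0 ((t.length : Int) - 1) 1).foldl (fun s i =>
    (PySem.List.pyRange 0 (min (((PySem.List.pyGetD t i []).length : Int)) (((PySem.List.pyGetD t (i + 1) []).length : Int))) 1).foldl (fun s j =>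
      if (PySem.List.pyGetD (PySem.List.pyGetD t i []) j "" == "T") && (PySem.List.pyGetD (PySem.List.pyGetD t (i + 1) []) j "" == "T") then
        PySem.Set.add (PySem.Set.add s (i, j)) (i + 1, j)
      else s) s) (hFold t)

lemma mem_hFold (t : List (List String)) (y : Int × Int) :
    y ∈ hFold t ↔ Hprop t y := by
  unfold hFold Hprop
  rw [mem_foldl_set _ _
    (fun p y => ∃ j ∈ PySem.List.pyRange 0 ((p.2.length : Int) - 1) 1,
      ((PySem.List.pyGetD p.2 j "" == "T") && (PySem.List.pyGetD p.2 (j + 1) "" == "T")) = true ∧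
      (y = (p.1, j) ∨ y = (p.1, j + 1)))
    (fun s p y => by
      exact mem_foldl_set _ _
        (fun j y => ((PySem.List.pyGetD p.2 j "" == "T") && (PySem.List.pyGetD p.2 (j + 1) "" == "T")) = true ∧
          (y = (p.1, j) ∨ y = (p.1, j + 1)))
        (fun s j y => mem_add2_if s _ _ _ y) s y)]
  simp [PySem.Set.empty]

lemma mem_Sterm (t : List (List String)) (y : Int × Int) :
    y ∈ Sterm t ↔ (Hprop t y ∨ Vprop t y) := by
  unfold Sterm Vprop
  rw [mem_foldl_set _ _
    (fun i y => ∃ j ∈ PySem.List.pyRange 0 (min (((PySem.List.pyGetD t i []).length : Int)) (((PySem.List.pyGetD t (i + 1) []).length : Int))) 1,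
      ((PySem.List.pyGetD (PySem.List.pyGetD t i []) j "" == "T") && (PySem.List.pyGetD (PySem.List.pyGetD t (i + 1) []) j "" == "T")) = true ∧
      (y = (i, j) ∨ y = (i + 1, j)))
    (fun s i y => by
      exact mem_foldl_set _ _
        (fun j y => ((PySem.List.pyGetD (PySem.List.pyGetD t i []) j "" == "T") && (PySem.List.pyGetD (PySem.List.pyGetD t (i + 1) []) j "" == "T")) = true ∧
          (y = (i, j) ∨ y = (i + 1, j)))
        (fun s j y => mem_add2_if s _ _ _ y) s y)]
  rw [mem_hFold]

lemma nodup_Sterm (t : List (List String)) : (Sterm t).Nodup := by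
  unfold Sterm
  apply nodup_foldl_set
  · intro s i hs
    apply nodup_foldl_set
    · intro s j hs
      exact nodup_add2_if _ _ _ _ hs
    · exact hs
  · unfold hFold
    apply nodup_foldl_set
    · intro s p hs
      apply nodup_foldl_set
      · intro s j hs
        exact nodup_add2_if _ _ _ _ hs
      · exact hs
    · exact List.nodup_nil

lemma B_eq_card (t : List (List String)) :
    verificar_tortugas_alt t = ((badCoords t).length : Int) := by
  have hSdef : verificar_tortugas_alt t = PySem.Set.len (Sterm t) := rfl
  rw [hSdef, set_len_eq]
  have hnd2 : (badCoords t).Nodup := List.Nodup.filter _ (nodup_allCoords t)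
  have hperm : (Sterm t).Perm (badCoords t) := by
    rw [List.perm_ext_iff_of_nodup (nodup_Sterm t) hnd2]
    intro y
    rw [mem_Sterm, HV_iff, ← mem_badCoords]
  rw [hperm.length_eq]

-- ===== VERDICT (by name: the statement is the Claim_ definition above) =====
theorem verificar_tortugas_spec : Claim_equal_verificar_tortugas := by
  intro t _ _
  unfold Spec_verificar_tortugas
  rw [A_eq_card t, B_eq_card t]

theorem verificar_tortugas_raises : Claim_raises_verificar_tortugas := by
  unfold Claim_raises_verificar_tortugas
  exact ⟨fun t _ h hpre => by
    obtain ⟨fila, hf, j, hT, row, hr, hle⟩ := h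
    exact absurd (hpre fila hf j hT row hr) (by omega), by decide⟩

-- self-check: the raise witness really lies in the region and B's port really returns the stated literal there
theorem pvRaiseWitness_verificar_tortugas_ok :
    Raises_verificar_tortugas pvRaiseWitness_verificar_tortugas ∧
    verificar_tortugas_alt pvRaiseWitness_verificar_tortugas = pvRaiseWitnessOut_verificar_tortugas :=
  ⟨verificar_tortugas_raises.2.2.1, verificar_tortugas_raises.2.2.2⟩
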